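-- pv_equiv track=rewrite | github.com/mattjhussey/pemjh | src/pemjh/challenge98/main.py | getWord_Squares
-- ===== SOURCE A (Python) =====
-- def getWord_Squares(word, square):
--     word_squares = {}
--     for w, s in zip(word, square):
--         if w in word_squares:
--             if word_squares[w] != s:
--                 word_squares = None
--                 return word_squares
--         word_squares[w] = s
--
--     return word_squares
-- ===== SOURCE B (Python) =====
-- def getWord_Squares(word, square):
--     pairs = list(zip(word, square))
--     for c in set(w for w, _ in pairs):
--         values = [s for w, s in pairs if w == c]
--         if any(v != values[0] for v in values):
--             return None
--     return dict(pairs)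
-- ===== Notes on version B (the rewrite author's own statement) =====
-- stated objective: alternative
-- what changed: B groups by distinct word letter: for each letter in set(word-prefix) it collects all square letters paired with it and checks they agree with the first, then returns dict(pairs) built in one shot, instead of A's single loop that interleaves membership tests, conflict checks and insertions on a growing dict.
import Mathlib
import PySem

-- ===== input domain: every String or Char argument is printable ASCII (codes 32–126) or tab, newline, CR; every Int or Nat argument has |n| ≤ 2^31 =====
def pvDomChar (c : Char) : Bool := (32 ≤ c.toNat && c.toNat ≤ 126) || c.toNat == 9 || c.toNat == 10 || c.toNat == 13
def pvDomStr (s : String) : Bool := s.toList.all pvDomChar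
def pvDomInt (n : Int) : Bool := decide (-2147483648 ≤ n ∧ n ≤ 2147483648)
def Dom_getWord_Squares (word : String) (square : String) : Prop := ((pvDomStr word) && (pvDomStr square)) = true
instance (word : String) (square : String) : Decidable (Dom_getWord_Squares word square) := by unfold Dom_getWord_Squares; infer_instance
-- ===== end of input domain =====

-- B groups square letters by word letter (for each distinct char, check all its values agree) and builds the result with dict(pairs), instead of A's single build-and-check loop on a growing dict; objective: alternative.


-- ===== PORT A =====
-- A's loop over zip(word, square): check each pair against the growing dict, insert, early-return None on conflict
def pvLoopA : List (String × String) → PySem.Dict String String →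
    Option (PySem.Dict String String)
  | [], d => some d
  | (w, s) :: rest, d =>
    if d.contains w then
      if d.get? w ≠ some s then none
      else pvLoopA rest (d.insert w s)
    else pvLoopA rest (d.insert w s)

def getWord_Squares (word : String) (square : String) : Option (List (String × String)) :=
  (pvLoopA ((word.toList.zip square.toList).map
      (fun p => (String.ofList [p.1], String.ofList [p.2]))) PySem.Dict.empty).map
    (fun d => d.items)

-- ===== PORT B =====
-- the values of one group: [s for w, s in pairs if w == c]
def pvGroup (pairs : List (String × String)) (c : String) : List String :=
  (pairs.filter (fun p => p.1 == c)).map Prod.snd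

-- B: for each distinct word letter c (set iteration; result is order-independent),
-- check all its square letters agree with the first one (values[0]: the group is
-- nonempty for every c of the set, so headD is exact there), then return dict(pairs).
def getWord_Squares_alt (word : String) (square : String) : Option (List (String × String)) :=
  let pairs := List.zipWith (fun a b => (String.ofList [a], String.ofList [b]))
      word.toList square.toList
  if (PySem.Set.ofList (pairs.map Prod.fst)).all
      (fun c => !((pvGroup pairs c).any (fun v => v != (pvGroup pairs c).headD "")))
  then some (PySem.Dict.ofList pairs).items
  else none

-- ===== PRECONDITION & SPEC =====
def Spec_getWord_Squares (word : String) (square : String) (out : Option (List (String × String))) : Prop := out = getWord_Squares_alt word square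
instance (word : String) (square : String) (out : Option (List (String × String))) : Decidable (Spec_getWord_Squares word square out) := by unfold Spec_getWord_Squares; infer_instance

-- ===== CLAIM =====
def Claim_equal_getWord_Squares : Prop := ∀ (word : String) (square : String), Dom_getWord_Squares word square → Spec_getWord_Squares word square (getWord_Squares word square)

-- ===== LEMMAS AND PROOFS =====

-- boolean mirror of A's per-pair check chain
def pvOkA : PySem.Dict String String → List (String × String) → Bool
  | _, [] => true
  | d, (w, s) :: rest =>
    (match d.get? w with
     | some u => u == s
     | none => true) && pvOkA (d.insert w s) rest

-- pairwise consistency of the pair list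
def pvCons (l : List (String × String)) : Prop :=
  ∀ p ∈ l, ∀ q ∈ l, p.1 = q.1 → p.2 = q.2

theorem pvLoopA_eq_if (l : List (String × String)) :
    ∀ d, pvLoopA l d =
      if pvOkA d l then some (l.foldl (fun d p => d.insert p.1 p.2) d) else none := by
  induction l with
  | nil => intro d; simp [pvLoopA, pvOkA]
  | cons p rest ih =>
    intro d
    obtain ⟨w, s⟩ := p
    simp only [pvLoopA, pvOkA, List.foldl_cons]
    cases hg : d.get? w with
    | none =>
      have hc : d.contains w = false := by
        rw [PySem.Dict.contains_eq_isSome_get?, hg]; rfl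
      simp [hc, ih]
    | some u =>
      have hc : d.contains w = true := by
        rw [PySem.Dict.contains_eq_isSome_get?, hg]; rfl
      by_cases he : u = s
      · subst he; simp [hc, ih]
      · simp [hc, he]

-- characterization of A's check chain
theorem pvOkA_iff (l : List (String × String)) :
    ∀ d, pvOkA d l = true ↔
      (pvCons l ∧ ∀ p ∈ l, ∀ u, d.get? p.1 = some u → u = p.2) := by
  induction l with
  | nil => intro d; simp [pvOkA, pvCons]
  | cons hd rest ih =>
    intro d
    obtain ⟨w, s⟩ := hd
    simp only [pvOkA, Bool.and_eq_true, ih]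
    constructor
    · rintro ⟨h1, hcons, h2⟩
      have hhead : ∀ u, d.get? w = some u → u = s := by
        intro u hu
        cases hg : d.get? w with
        | none => simp [hg] at hu
        | some v =>
          rw [hg] at hu; cases hu
          simpa [hg] using h1
      have hrest_w : ∀ p ∈ rest, p.1 = w → p.2 = s := by
        intro p hp hpw
        have hg : (d.insert w s).get? p.1 = some s := by
          rw [hpw]; exact PySem.Dict.get?_insert_self _ _ _
        exact (h2 p hp s hg).symm
      refine ⟨?_, ?_⟩
      · intro p hp q hq hpq
        rcases List.mem_cons.mp hp with hp | hp <;>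
          rcases List.mem_cons.mp hq with hq | hq
        · rw [hp, hq]
        · subst hp; exact (hrest_w q hq (by simpa using hpq.symm)).symm
        · subst hq; exact hrest_w p hp (by simpa using hpq)
        · exact hcons p hp q hq hpq
      · intro p hp u hu
        rcases List.mem_cons.mp hp with hp | hp
        · subst hp; exact hhead u hu
        · by_cases hpw : p.1 = w
          · have : u = s := by
              exact hhead u (by rwa [hpw] at hu) |>.trans rfl
            rw [this]; exact (hrest_w p hp hpw).symm
          · exact h2 p hp u (by rw [PySem.Dict.get?_insert_of_ne _ _ hpw]; exact hu)
    · rintro ⟨hcons, h2⟩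
      refine ⟨?_, ?_, ?_⟩
      · cases hg : d.get? w with
        | none => rfl
        | some u =>
          have := h2 (w, s) (List.mem_cons_self) u (by simpa using hg)
          simp [this]
      · intro p hp q hq hpq
        exact hcons p (List.mem_cons_of_mem _ hp) q (List.mem_cons_of_mem _ hq) hpq
      · intro p hp u hu
        by_cases hpw : p.1 = w
        · rw [hpw, PySem.Dict.get?_insert_self] at hu
          cases hu
          exact (hcons (w, s) (List.mem_cons_self) p (List.mem_cons_of_mem _ hp) hpw.symm)
        · exact h2 p (List.mem_cons_of_mem _ hp) u
            (by rwa [PySem.Dict.get?_insert_of_ne _ _ hpw] at hu)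

-- A's check chain from the empty dict succeeds exactly on consistent pair lists
theorem pvOkA_empty_iff (l : List (String × String)) :
    (pvOkA PySem.Dict.empty l = true) ↔ pvCons l := by
  rw [pvOkA_iff]
  constructor
  · exact fun h => h.1
  · intro h
    exact ⟨h, fun p _ u hu => by rw [PySem.Dict.get?_empty] at hu; cases hu⟩

-- membership in a group
theorem pvGroup_mem (l : List (String × String)) (c v : String) :
    v ∈ pvGroup l c ↔ ∃ q ∈ l, q.1 = c ∧ q.2 = v := by
  simp only [pvGroup, List.mem_map, List.mem_filter, beq_iff_eq]
  constructor
  · rintro ⟨q, ⟨hq, hqc⟩, hv⟩; exact ⟨q, hq, hqc, hv⟩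
  · rintro ⟨q, hq, hqc, hv⟩; exact ⟨q, ⟨hq, hqc⟩, hv⟩

-- B's group check succeeds on all distinct keys exactly on consistent pair lists
theorem pvCheck_iff (l : List (String × String)) :
    ((PySem.Set.ofList (l.map Prod.fst)).all
        (fun c => !((pvGroup l c).any (fun v => v != (pvGroup l c).headD ""))) = true)
    ↔ pvCons l := by
  simp only [List.all_eq_true, Bool.not_eq_eq_eq_not, Bool.not_true, List.any_eq_false,
    bne_iff_ne, ne_eq, not_not, PySem.Set.mem_ofList, List.mem_map]
  constructor
  · intro h p hp q hq hpq
    have hc : ∃ r ∈ l, r.1 = p.1 := ⟨p, hp, rfl⟩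
    have hh := h p.1 ⟨p, hp, rfl⟩
    have h1 := hh p.2 ((pvGroup_mem l p.1 p.2).mpr ⟨p, hp, rfl, rfl⟩)
    have h2 := hh q.2 ((pvGroup_mem l p.1 q.2).mpr ⟨q, hq, hpq.symm, rfl⟩)
    rw [h1, h2]
  · rintro hc c ⟨p, hp, hpc⟩ v hv
    obtain ⟨q, hq, hqc, hqv⟩ := (pvGroup_mem l c v).mp hv
    have hne : pvGroup l c ≠ [] := by
      intro h0; rw [h0] at hv; cases hv
    obtain ⟨w, ws, hw⟩ := List.exists_cons_of_ne_nil hne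
    have hwmem : w ∈ pvGroup l c := by rw [hw]; exact List.mem_cons_self
    obtain ⟨r, hr, hrc, hrw⟩ := (pvGroup_mem l c w).mp hwmem
    have : q.2 = r.2 := hc q hq r hr (hqc.trans hrc.symm)
    rw [← hqv, this, hrw, hw, List.headD_cons]

-- ===== VERDICT =====
theorem getWord_Squares_spec : Claim_equal_getWord_Squares := by
  intro word square _
  unfold Spec_getWord_Squares getWord_Squares getWord_Squares_alt
  have hz : List.zipWith (fun a b => (String.ofList [a], String.ofList [b]))
      word.toList square.toList =
      (word.toList.zip square.toList).map
        (fun p => (String.ofList [p.1], String.ofList [p.2])) := by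
    simp [List.zip, List.map_zipWith]
  rw [hz, pvLoopA_eq_if]
  set l := (word.toList.zip square.toList).map
      (fun p => (String.ofList [p.1], String.ofList [p.2]))
  by_cases h : pvCons l
  · rw [if_pos ((pvOkA_empty_iff _).mpr h), if_pos ((pvCheck_iff _).mpr h)]
    rfl
  · rw [if_neg (fun hh => h ((pvOkA_empty_iff _).mp hh)),
        if_neg (fun hh => h ((pvCheck_iff _).mp hh))]
    simp
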